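-- pv_equiv track=rewrite | github.com/iamvickynguyen/Kattis-Solutions | palindromic_password.py | find_2_digits_palindrome
-- ===== SOURCE A (Python) =====
-- def find_2_digits_palindrome(n):
--     lower = n
--     while lower % 10 != lower//10:
--         lower -= 1
--     if lower == 0:
--         lower = "00"
--     upper = n
--     while upper % 10 != upper//10:
--         upper += 1
--     return str(lower), str(upper)
-- ===== SOURCE B (Python) =====
-- def find_2_digits_palindrome(n):
--     # Equal-digit numbers in 0..99 are exactly the multiples of 11.
--     lower = (n // 11) * 11
--     upper = ((n + 10) // 11) * 11
--     return ("00" if lower == 0 else str(lower)), str(upper)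
-- ===== Notes on version B (the rewrite author's own statement) =====
-- stated objective: simpler
-- what changed: Both while-loops are replaced by closed-form floor-division arithmetic: two-equal-digit numbers in 0..99 are exactly the multiples of 11, so lower = (n//11)*11 and upper = ((n+10)//11)*11.
import Mathlib
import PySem

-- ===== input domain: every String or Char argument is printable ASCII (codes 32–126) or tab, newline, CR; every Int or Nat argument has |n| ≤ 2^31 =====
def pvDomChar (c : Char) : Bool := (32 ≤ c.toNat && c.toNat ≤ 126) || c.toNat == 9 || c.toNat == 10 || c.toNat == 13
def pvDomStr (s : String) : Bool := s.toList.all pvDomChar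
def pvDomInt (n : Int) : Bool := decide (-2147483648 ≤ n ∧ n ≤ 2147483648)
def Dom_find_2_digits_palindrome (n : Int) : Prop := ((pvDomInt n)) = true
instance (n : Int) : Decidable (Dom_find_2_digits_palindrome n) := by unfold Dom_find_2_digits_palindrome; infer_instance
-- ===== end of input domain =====

-- B replaces A's two decrement/increment while-loops by closed-form floor-division
-- arithmetic (multiples of 11); objective: simpler.


-- ===== PORT A =====
-- A's while-loops, fuel-bounded (the Python loops diverge for n < 0 / n > 99,
-- which Pre_ excludes; inside Pre_ each loop runs at most 10 steps, so fuel 100 is exact).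
def pvLowerLoop : Nat → Int → Int
  | 0, l => l
  | f + 1, l =>
    if PySem.Int.mod l 10 ≠ PySem.Int.floordiv l 10 then pvLowerLoop f (l - 1) else l

def pvUpperLoop : Nat → Int → Int
  | 0, u => u
  | f + 1, u =>
    if PySem.Int.mod u 10 ≠ PySem.Int.floordiv u 10 then pvUpperLoop f (u + 1) else u

def find_2_digits_palindrome (n : Int) : String × String :=
  let lower := pvLowerLoop 100 n
  let lowerStr := if lower = 0 then "00" else PySem.Int.toStr lower
  let upper := pvUpperLoop 100 n
  (lowerStr, PySem.Int.toStr upper)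

-- ===== PORT B =====
def find_2_digits_palindrome_alt (n : Int) : String × String :=
  let lower := (PySem.Int.floordiv n 11) * 11
  let upper := (PySem.Int.floordiv (n + 10) 11) * 11
  ((if lower = 0 then "00" else PySem.Int.toStr lower), PySem.Int.toStr upper)

-- ===== PRECONDITION & SPEC =====
-- Pre_ excludes n < 0 and n > 99, on which A's while-loops never terminate (no value is returned).
def Pre_find_2_digits_palindrome (n : Int) : Prop := 0 ≤ n ∧ n ≤ 99
instance (n : Int) : Decidable (Pre_find_2_digits_palindrome n) := by unfold Pre_find_2_digits_palindrome; infer_instance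
def pvWitness_find_2_digits_palindrome : Int := (42)

def Spec_find_2_digits_palindrome (n : Int) (out : String × String) : Prop := out = find_2_digits_palindrome_alt n
instance (n : Int) (out : String × String) : Decidable (Spec_find_2_digits_palindrome n out) := by unfold Spec_find_2_digits_palindrome; infer_instance

-- ===== CLAIM (what is proved, stated in full; the proofs are below) =====
def Claim_equal_find_2_digits_palindrome : Prop := ∀ (n : Int), Dom_find_2_digits_palindrome n → Pre_find_2_digits_palindrome n → Spec_find_2_digits_palindrome n (find_2_digits_palindrome n)

-- ===== LEMMAS AND PROOFS =====

-- ===== VERDICT (by name: the statement is the Claim_ definition above) =====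
theorem find_2_digits_palindrome_spec : Claim_equal_find_2_digits_palindrome := by
  intro n _ hp
  unfold Spec_find_2_digits_palindrome
  obtain ⟨h0, h99⟩ := hp
  interval_cases n <;> decide
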